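-- pv_equiv track=rewrite | github.com/BergnaCaro/Ejemplo_Funciones | Examen_funciones_2.py | multiplicacion
-- ===== SOURCE A (Python) =====
-- def multiplicacion(numero1, numero2):
--     resultado=1
--
--     if numero1 < numero2:
--         for elemento in range(numero1,numero2+1):
--             resultado = resultado * elemento
--
--     else:
--         for elemento in range(numero2,numero1+1):
--             resultado = resultado * elemento
--
--     return resultado
-- ===== SOURCE B (Python) =====
-- def multiplicacion(numero1, numero2):
--     lo = min(numero1, numero2)
--     hi = max(numero1, numero2)
--
--     def prod(a, b):
--         if a > b:
--             return 1
--         if a == b: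
--             return a
--         mid = (a + b) // 2
--         return prod(a, mid) * prod(mid + 1, b)
--
--     return prod(lo, hi)
-- ===== Notes on version B (the rewrite author's own statement) =====
-- stated objective: alternative
-- what changed: Replaces the single left-to-right accumulating loop over range(lo,hi+1) with a recursive divide-and-conquer product over the interval [lo,hi], splitting at the floor midpoint.
import Mathlib
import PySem

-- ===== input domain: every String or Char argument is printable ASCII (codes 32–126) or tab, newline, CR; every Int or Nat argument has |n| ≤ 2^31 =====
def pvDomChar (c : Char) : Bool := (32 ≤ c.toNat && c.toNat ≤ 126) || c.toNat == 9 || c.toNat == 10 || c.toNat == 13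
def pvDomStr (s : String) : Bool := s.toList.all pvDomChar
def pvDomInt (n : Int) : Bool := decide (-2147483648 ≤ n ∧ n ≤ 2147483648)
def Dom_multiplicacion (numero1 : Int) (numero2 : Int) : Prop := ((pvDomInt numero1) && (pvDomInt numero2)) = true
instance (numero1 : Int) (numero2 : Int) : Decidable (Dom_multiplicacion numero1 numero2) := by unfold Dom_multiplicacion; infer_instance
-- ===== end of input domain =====

-- B replaces A's single accumulating loop by a divide-and-conquer product over [min,max]; alternative structure, same cost.


-- ===== PORT A =====
def multiplicacion (numero1 : Int) (numero2 : Int) : Int :=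
  if numero1 < numero2 then
    (PySem.List.pyRange numero1 (numero2 + 1) 1).foldl (fun resultado elemento => resultado * elemento) 1
  else
    (PySem.List.pyRange numero2 (numero1 + 1) 1).foldl (fun resultado elemento => resultado * elemento) 1

-- ===== PORT B =====
-- recursive helper prod(a, b): divide-and-conquer product of the interval [a, b]
def pvProd (a b : Int) : Int :=
  if _h1 : a > b then 1
  else if _h2 : a = b then a
  else
    let mid := PySem.Int.floordiv (a + b) 2
    pvProd a mid * pvProd (mid + 1) b
termination_by (b - a).toNat
decreasing_by
  · have hb := PySem.Int.floordiv_two_mid_bounds (le_of_lt (lt_of_le_of_ne (le_of_not_gt _h1) _h2))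
    have : PySem.Int.floordiv (a + b) 2 < b := by
      rw [PySem.Int.floordiv_eq_ediv_of_pos (by omega)]; omega
    omega
  · have : a ≤ PySem.Int.floordiv (a + b) 2 := by
      rw [PySem.Int.floordiv_eq_ediv_of_pos (by omega)]; omega
    omega

def multiplicacion_alt (numero1 : Int) (numero2 : Int) : Int :=
  pvProd (min numero1 numero2) (max numero1 numero2)

-- ===== PRECONDITION & SPEC =====
def Spec_multiplicacion (numero1 : Int) (numero2 : Int) (out : Int) : Prop := out = multiplicacion_alt numero1 numero2
instance (numero1 : Int) (numero2 : Int) (out : Int) : Decidable (Spec_multiplicacion numero1 numero2 out) := by unfold Spec_multiplicacion; infer_instance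

-- ===== CLAIM (what is proved, stated in full; the proofs are below) =====
def Claim_equal_multiplicacion : Prop := ∀ (numero1 : Int) (numero2 : Int), Dom_multiplicacion numero1 numero2 → Spec_multiplicacion numero1 numero2 (multiplicacion numero1 numero2)

-- ===== LEMMAS AND PROOFS =====

lemma pvProd_eq_prod : ∀ (n : Nat) (a b : Int), (b - a).toNat ≤ n →
    pvProd a b = (PySem.List.pyRange a (b + 1) 1).prod := by
  intro n
  induction n with
  | zero =>
    intro a b h
    have hba : b ≤ a := by omega
    rw [pvProd]
    by_cases hgt : a > b
    · simp [hgt, PySem.List.pyRange_one_eq_nil (by omega : b + 1 ≤ a)]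
    · have : a = b := by omega
      subst this
      simp [PySem.List.pyRange_one_singleton]
  | succ n ih =>
    intro a b h
    rw [pvProd]
    by_cases hgt : a > b
    · simp [hgt, PySem.List.pyRange_one_eq_nil (by omega : b + 1 ≤ a)]
    · by_cases heq : a = b
      · subst heq
        simp [PySem.List.pyRange_one_singleton]
      · have hab : a < b := lt_of_le_of_ne (le_of_not_gt hgt) heq
        have hmid : a ≤ PySem.Int.floordiv (a + b) 2 ∧ PySem.Int.floordiv (a + b) 2 < b := by
          rw [PySem.Int.floordiv_eq_ediv_of_pos (by omega)]
          constructor <;> omega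
        obtain ⟨hm1, hm2⟩ := hmid
        rw [dif_neg hgt, dif_neg heq]
        set mid := PySem.Int.floordiv (a + b) 2 with hm
        show pvProd a mid * pvProd (mid + 1) b = _
        rw [ih a mid (by omega), ih (mid + 1) b (by omega)]
        rw [PySem.List.pyRange_one_append a (mid + 1) (b + 1) (by omega) (by omega),
          List.prod_append]

lemma pvProd_eq (a b : Int) : pvProd a b = (PySem.List.pyRange a (b + 1) 1).prod :=
  pvProd_eq_prod (b - a).toNat a b le_rfl

lemma foldl_mul_eq_prod (l : List Int) : l.foldl (fun r e => r * e) 1 = l.prod := by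
  rw [List.prod_eq_foldl]

-- ===== VERDICT (by name: the statement is the Claim_ definition above) =====
theorem multiplicacion_spec : Claim_equal_multiplicacion := by
  intro n1 n2 _
  unfold Spec_multiplicacion multiplicacion multiplicacion_alt
  by_cases h : n1 < n2
  · simp [h, foldl_mul_eq_prod, pvProd_eq, min_eq_left (le_of_lt h), max_eq_right (le_of_lt h)]
  · simp [h, foldl_mul_eq_prod, pvProd_eq, min_eq_right (le_of_not_gt h), max_eq_left (le_of_not_gt h)]
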